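-- pv_equiv track=rewrite | github.com/RheinGold1999/rays_riscv | tests/processor/test_processor.py | wdata_after_mask
-- ===== SOURCE A (Python) =====
-- U32_MAX = 0xFFFF_FFFF
--
-- def wdata_after_mask(ori_data, wdata, wmask):
--   wr_mask = 0
--   for i in range(4):
--     if (wmask >> i) & 0x1:
--       wr_mask |= (0xFF << (i * 8))
--   wr_unmask = U32_MAX ^ wr_mask
--   wr_data = (ori_data & wr_unmask) | (wdata & wr_mask)
--   return wr_data
-- ===== SOURCE B (Python) =====
-- def wdata_after_mask(ori_data, wdata, wmask):
--   res = 0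
--   for i in range(4):
--     src = wdata if (wmask >> i) & 1 else ori_data
--     res |= ((src >> (8 * i)) & 0xFF) << (8 * i)
--   return res
-- ===== Notes on version B (the rewrite author's own statement) =====
-- stated objective: simpler
-- what changed: B assembles the result byte by byte in one pass (selecting each byte from wdata or ori_data and OR-ing it into the accumulator), instead of first building a write mask, complementing it via XOR with U32_MAX, and then AND/OR-merging the two words.
import Mathlib
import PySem

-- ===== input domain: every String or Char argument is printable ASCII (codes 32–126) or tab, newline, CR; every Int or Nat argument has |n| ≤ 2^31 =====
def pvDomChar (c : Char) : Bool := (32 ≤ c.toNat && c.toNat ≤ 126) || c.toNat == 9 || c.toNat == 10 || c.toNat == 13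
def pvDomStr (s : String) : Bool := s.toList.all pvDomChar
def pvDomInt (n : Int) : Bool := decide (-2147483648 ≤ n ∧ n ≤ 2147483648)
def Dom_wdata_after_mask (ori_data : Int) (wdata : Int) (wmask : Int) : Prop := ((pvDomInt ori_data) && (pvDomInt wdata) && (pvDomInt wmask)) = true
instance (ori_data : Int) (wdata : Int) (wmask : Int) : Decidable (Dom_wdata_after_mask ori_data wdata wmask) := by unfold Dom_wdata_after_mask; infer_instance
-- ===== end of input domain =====

-- B replaces A's mask-build/XOR-complement/AND-OR-merge with a direct byte-by-byte assembly
-- of the result (objective: simpler); the return values are proved equal for all integer inputs in Dom.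

-- ===== PORT A =====
def wdata_after_mask (ori_data : Int) (wdata : Int) (wmask : Int) : Int :=
  let wr_mask := (PySem.List.pyRange 0 4 1).foldl
    (fun m i => if PySem.Int.band (wmask >>> i.toNat) 1 ≠ 0 then PySem.Int.bor m (255 <<< (i.toNat * 8)) else m) 0
  let wr_unmask := PySem.Int.bxor 4294967295 wr_mask
  PySem.Int.bor (PySem.Int.band ori_data wr_unmask) (PySem.Int.band wdata wr_mask)

-- ===== PORT B =====
def wdata_after_mask_alt (ori_data : Int) (wdata : Int) (wmask : Int) : Int :=
  (PySem.List.pyRange 0 4 1).foldl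
    (fun res i =>
      let src := if PySem.Int.band (wmask >>> i.toNat) 1 ≠ 0 then wdata else ori_data
      PySem.Int.bor res (PySem.Int.band (src >>> (8 * i.toNat)) 255 <<< (8 * i.toNat))) 0

-- ===== PRECONDITION & SPEC =====
def Spec_wdata_after_mask (ori_data : Int) (wdata : Int) (wmask : Int) (out : Int) : Prop := out = wdata_after_mask_alt ori_data wdata wmask
instance (ori_data : Int) (wdata : Int) (wmask : Int) (out : Int) : Decidable (Spec_wdata_after_mask ori_data wdata wmask out) := by unfold Spec_wdata_after_mask; infer_instance

-- ===== CLAIM (what is proved, stated in full; the proofs are below) =====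
def Claim_equal_wdata_after_mask : Prop := ∀ (ori_data : Int) (wdata : Int) (wmask : Int), Dom_wdata_after_mask ori_data wdata wmask → Spec_wdata_after_mask ori_data wdata wmask (wdata_after_mask ori_data wdata wmask)

-- ===== LEMMAS AND PROOFS =====
-- disjoint or = add
theorem pv_add_eq_lor (x y : Nat) (h : x &&& y = 0) : x ||| y = x + y := by
  induction x using Nat.strong_induction_on generalizing y with
  | _ x ih =>
    rcases Nat.eq_zero_or_pos x with hx | hx
    · simp [hx]
    · have hd : x / 2 &&& y / 2 = 0 := by rw [← Nat.and_div_two, h]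
      have ih2 := ih (x / 2) (Nat.div_lt_self hx (by norm_num)) (y / 2) hd
      have hpar : ¬ (x % 2 = 1 ∧ y % 2 = 1) := by
        intro ⟨h1, h2⟩
        have : (x &&& y).testBit 0 = true := by
          simp [Nat.testBit_zero, h1, h2]
        rw [h] at this
        simp at this
      have hor2 : (x ||| y) / 2 = x / 2 ||| y / 2 := Nat.or_div_two
      have hmod : (x ||| y) % 2 = x % 2 + y % 2 := by
        have b0 : (x ||| y) &&& 1 = (x &&& 1) ||| (y &&& 1) := Nat.and_or_distrib_right x y 1
        simp only [Nat.and_one_is_mod] at b0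
        rcases Nat.mod_two_eq_zero_or_one x with h1 | h1 <;>
          rcases Nat.mod_two_eq_zero_or_one y with h2 | h2 <;>
          rw [h1, h2] at b0 <;>
          first
            | (rw [b0, h1, h2]; simp; done)
            | (exact absurd ⟨h1, h2⟩ hpar)
      omega

theorem pv_maskBit (s i : Nat) : ((255 <<< s : Nat)).testBit i = (!decide (i < s) && decide (i < s + 8)) := by
  rw [Nat.testBit_shiftLeft]
  by_cases h : s ≤ i
  · rw [show (255 : Nat) = 2 ^ 8 - 1 by norm_num, Nat.testBit_two_pow_sub_one]
    simp [h, Nat.not_lt.mpr h]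
    omega
  · simp [h]

theorem pv_byteBit (X s i : Nat) :
    (((X >>> s) &&& 255) <<< s).testBit i = (!decide (i < s) && (decide (i < s + 8) && X.testBit i)) := by
  rw [Nat.testBit_shiftLeft]
  by_cases h : s ≤ i
  · rw [Nat.testBit_and, Nat.testBit_shiftRight,
      show (255 : Nat) = 2 ^ 8 - 1 by norm_num, Nat.testBit_two_pow_sub_one,
      Nat.add_sub_cancel' h]
    simp [h, Nat.not_lt.mpr h]
    cases hX : X.testBit i <;> simp <;> try omega
  · simp [h]

theorem pv_allBit (i : Nat) : (4294967295 : Nat).testBit i = decide (i < 32) := by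
  rw [show (4294967295 : Nat) = 2 ^ 32 - 1 by norm_num, Nat.testBit_two_pow_sub_one]

theorem pv_emod_neg (b M : Int) (hM : 0 < M) : (-1 - b) % M = M - 1 - b % M := by
  have h1 : b % M + M * (b / M) = b := Int.emod_add_ediv b M
  have hr0 : 0 ≤ b % M := Int.emod_nonneg b (ne_of_gt hM)
  have hr1 : b % M < M := Int.emod_lt_of_pos b hM
  have h2 : (-1 - b) = (M - 1 - b % M) + M * (-(b / M) - 1) := by
    have : M * (-(b / M) - 1) = -(M * (b / M)) - M := by ring
    omega
  calc (-1 - b) % M = ((M - 1 - b % M) + M * (-(b / M) - 1)) % M := by rw [← h2]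
    _ = (M - 1 - b % M) % M := by rw [Int.add_mul_emod_self_left]
    _ = M - 1 - b % M := Int.emod_eq_of_lt (by omega) (by omega)

theorem pv_band_emod (a : Int) (k u : Nat) (hu : u < 2 ^ k) :
    PySem.Int.band a (u : Int) = (((a % ((2 ^ k : Nat) : Int)).toNat &&& u : Nat) : Int) := by
  have hpow : (0 : Int) < ((2 ^ k : Nat) : Int) := by positivity
  rw [PySem.Int.band.eq_1]
  by_cases ha : 0 ≤ a
  · simp only [ha, if_true, Int.natCast_nonneg, Int.toNat_natCast]
    have hm : ((a.toNat % 2 ^ k : Nat) : Int) = a % ((2 ^ k : Nat) : Int) := by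
      rw [Int.natCast_mod, Int.toNat_of_nonneg ha]
    rw [← hm, Int.toNat_natCast]
    congr 1
    apply Nat.eq_of_testBit_eq
    intro i
    rw [Nat.testBit_and, Nat.testBit_and, Nat.testBit_mod_two_pow]
    by_cases hik : i < k
    · simp [hik]
    · have hui : u.testBit i = false :=
        Nat.testBit_lt_two_pow (lt_of_lt_of_le hu (Nat.pow_le_pow_right (by norm_num) (by omega)))
      simp [hik, hui]
  · simp only [ha, if_false, Int.natCast_nonneg, if_true, Int.toNat_natCast]
    have hn0 : 0 ≤ -a - 1 := by omega
    set n : Nat := (-a - 1).toNat with hn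
    have ha' : a = -1 - (n : Int) := by omega
    have hmod : (a % ((2 ^ k : Nat) : Int)).toNat = 2 ^ k - 1 - n % 2 ^ k := by
      rw [ha', pv_emod_neg _ _ hpow]
      have : (n : Int) % ((2 ^ k : Nat) : Int) = ((n % 2 ^ k : Nat) : Int) := by
        rw [Int.natCast_mod]
      rw [this]
      have h2 : n % 2 ^ k < 2 ^ k := Nat.mod_lt _ (by positivity)
      omega
    rw [hmod]
    set n' := n % 2 ^ k with hn'
    have hn'lt : n' < 2 ^ k := Nat.mod_lt _ (by positivity)
    have hcbit : ∀ i, (2 ^ k - (n' + 1)).testBit i = (decide (i < k) && !n'.testBit i) :=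
      Nat.testBit_two_pow_sub_succ hn'lt
    have hhigh : ∀ i, ¬ i < k → u.testBit i = false := fun i hik =>
      Nat.testBit_lt_two_pow (lt_of_lt_of_le hu (Nat.pow_le_pow_right (by norm_num) (by omega)))
    have h1 : u &&& n = u &&& n' := by
      apply Nat.eq_of_testBit_eq
      intro i
      rw [Nat.testBit_and, Nat.testBit_and, hn', Nat.testBit_mod_two_pow]
      by_cases hik : i < k
      · simp [hik]
      · simp [hhigh i hik]
    have h2 : ((2 ^ k - (n' + 1)) &&& u) &&& (u &&& n') = 0 := by
      apply Nat.eq_of_testBit_eq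
      intro i
      simp only [Nat.testBit_and, hcbit, Nat.zero_testBit]
      by_cases hik : i < k
      · cases hni : n'.testBit i <;> simp [hik, hni]
      · simp [hhigh i hik]
    have h3 : ((2 ^ k - (n' + 1)) &&& u) ||| (u &&& n') = u := by
      apply Nat.eq_of_testBit_eq
      intro i
      simp only [Nat.testBit_or, Nat.testBit_and, hcbit]
      by_cases hik : i < k
      · cases hni : n'.testBit i <;> cases hui : u.testBit i <;> simp [hik, hni, hui]
      · simp [hhigh i hik]
    have h4 : ((2 ^ k - (n' + 1)) &&& u) + (u &&& n') = u := by
      rw [← pv_add_eq_lor _ _ h2]; exact h3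
    have hgoal : u - (u &&& n) = (2 ^ k - 1 - n') &&& u := by
      rw [h1, show 2 ^ k - 1 - n' = 2 ^ k - (n' + 1) by omega]
      omega
    rw [hgoal]

theorem pv_byte_conv_nat (a : Int) (s : Nat) (hs : s = 0 ∨ s = 8 ∨ s = 16 ∨ s = 24) :
    PySem.Int.band (a >>> s) 255 = ((((a % 4294967296).toNat >>> s) &&& 255 : Nat) : Int) := by
  have h := pv_band_emod (a >>> s) 8 255 (by norm_num)
  norm_num at h
  rw [h]
  congr 1
  rw [Nat.shiftRight_eq_div_pow, Int.shiftRight_eq_div_pow]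
  rw [show (255 : Nat) = 2 ^ 8 - 1 by norm_num, Nat.and_two_pow_sub_one_eq_mod,
    Nat.and_two_pow_sub_one_eq_mod]
  rcases hs with h | h | h | h <;> subst h <;> norm_num <;> omega

theorem pv_byte_conv (a : Int) (t : Int) (ht : t = 0 ∨ t = 8 ∨ t = 16 ∨ t = 24) :
    PySem.Int.band (a >>> t) 255 = ((((a % 4294967296).toNat >>> t.toNat) &&& 255 : Nat) : Int) := by
  rcases ht with h | h | h | h <;> subst h
  · rw [show (0 : Int) = ((0 : Nat) : Int) by norm_num, Int.shiftRight_natCast_right]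
    exact pv_byte_conv_nat a 0 (by norm_num)
  · rw [show (8 : Int) = ((8 : Nat) : Int) by norm_num, Int.shiftRight_natCast_right]
    exact pv_byte_conv_nat a 8 (by norm_num)
  · rw [show (16 : Int) = ((16 : Nat) : Int) by norm_num, Int.shiftRight_natCast_right]
    exact pv_byte_conv_nat a 16 (by norm_num)
  · rw [show (24 : Int) = ((24 : Nat) : Int) by norm_num, Int.shiftRight_natCast_right]
    exact pv_byte_conv_nat a 24 (by norm_num)

theorem pv_cast_shl (b : Nat) (t : Int) (ht : 0 ≤ t) :
    ((b : Int)) <<< t = ((b <<< t.toNat : Nat) : Int) := by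
  obtain ⟨n, rfl⟩ : ∃ n : Nat, t = (n : Int) := ⟨t.toNat, (Int.toNat_of_nonneg ht).symm⟩
  rw [Int.shiftLeft_natCast_right, Int.natCast_shiftLeft, Int.toNat_natCast]

theorem pv_zero_bor (x : Int) : PySem.Int.bor 0 x = x := by
  rw [PySem.Int.bor_comm]; exact PySem.Int.bor_zero x

theorem pv_band32 (a : Int) (u : Nat) (hu : u < 4294967296) :
    PySem.Int.band a (u : Int) = (((a % 4294967296).toNat &&& u : Nat) : Int) := by
  have h := pv_band_emod a 32 u (by norm_num; omega)
  norm_num at h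
  exact h

theorem pv_bxor_true (a b : Bool) : ((a ^^ b) = true) = ((a = true) ↔ ¬ (b = true)) := by
  cases a <;> cases b <;> simp

theorem pv_255Bit (i : Nat) : (255 : Nat).testBit i = decide (i < 8) := by
  rw [show (255 : Nat) = 2 ^ 8 - 1 by norm_num, Nat.testBit_two_pow_sub_one]

set_option maxHeartbeats 2000000 in
theorem pv_main (ori_data wdata wmask : Int) :
    wdata_after_mask ori_data wdata wmask = wdata_after_mask_alt ori_data wdata wmask := by
  unfold wdata_after_mask wdata_after_mask_alt
  rw [show PySem.List.pyRange 0 4 1 = [0, 1, 2, 3] from by decide]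
  simp only [List.foldl]
  norm_num
  simp only [show Int.toNat 2 * 8 = 16 from rfl, show Int.toNat 3 * 8 = 24 from rfl]
  by_cases h0 : PySem.Int.band (wmask >>> 0) 1 = 0 <;>
    by_cases h1 : PySem.Int.band (wmask >>> 1) 1 = 0 <;>
    by_cases h2 : PySem.Int.band (wmask >>> 2) 1 = 0 <;>
    by_cases h3 : PySem.Int.band (wmask >>> 3) 1 = 0 <;>
    simp only [h0, h1, h2, h3, if_true, if_false, eq_self_iff_true, if_neg, if_pos]
  all_goals
    simp only [pv_byte_conv ori_data 0 (by norm_num), pv_byte_conv wdata 0 (by norm_num),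
      pv_byte_conv ori_data 8 (by norm_num), pv_byte_conv wdata 8 (by norm_num),
      pv_byte_conv ori_data 16 (by norm_num), pv_byte_conv wdata 16 (by norm_num),
      pv_byte_conv ori_data 24 (by norm_num), pv_byte_conv wdata 24 (by norm_num)]
    simp only [PySem.Int.bxor_zero, PySem.Int.band_zero, PySem.Int.bor_zero, pv_zero_bor]
    simp only [show (255 : Int) = ((255 : Nat) : Int) from by norm_num,
      show (4294967295 : Int) = ((4294967295 : Nat) : Int) from by norm_num,
      pv_cast_shl (t := 0) (ht := by norm_num), pv_cast_shl (t := 8) (ht := by norm_num),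
      pv_cast_shl (t := 16) (ht := by norm_num), pv_cast_shl (t := 24) (ht := by norm_num),
      show Int.toNat 8 = 8 from rfl, show Int.toNat 16 = 16 from rfl,
      show Int.toNat 24 = 24 from rfl, Int.toNat_zero, ← Int.natCast_shiftLeft,
      PySem.Int.bor_natCast, PySem.Int.bxor_natCast]
    (first
      | rw [pv_band32 ori_data, pv_band32 wdata]
      | rw [pv_band32 ori_data])
    try simp only [PySem.Int.bor_natCast]
    rw [Nat.cast_inj]
    apply Nat.eq_of_testBit_eq
    intro i
    simp only [Nat.testBit_or, Nat.testBit_and, Nat.testBit_xor, pv_byteBit, pv_maskBit,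
      pv_allBit, pv_255Bit, Nat.zero_testBit]
    rw [Bool.eq_iff_iff]
    cases hO : (ori_data % 4294967296).toNat.testBit i <;>
      cases hD : (wdata % 4294967296).toNat.testBit i <;>
      simp only [hO, hD, Bool.and_true, Bool.and_false, Bool.true_and, Bool.false_and,
        Bool.or_false, Bool.false_or, Bool.or_true, Bool.true_or, Bool.not_true, Bool.not_false,
        Bool.or_eq_true, Bool.and_eq_true, Bool.not_eq_true', decide_eq_true_eq,
        decide_eq_false_iff_not, Bool.false_eq_true, Bool.true_eq_false, iff_true, true_iff,
        iff_false, false_iff, not_lt, not_le, pv_bxor_true] <;> omega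
  all_goals decide

-- ===== VERDICT (by name: the statement is the Claim_ definition above) =====
theorem wdata_after_mask_spec : Claim_equal_wdata_after_mask := by
  intro ori_data wdata wmask _
  unfold Spec_wdata_after_mask
  exact pv_main ori_data wdata wmask
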